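-- pv_equiv track=rewrite | github.com/sciencestack-ai/latex2json | latex2json/utils/tex_utils.py | check_delimiter_balance
-- ===== SOURCE A (Python) =====
-- def count_preceding_backslashes(text: str, pos: int) -> int:
--     """Count number of backslashes immediately preceding the position."""
--     count = 0
--     pos -= 1
--     while pos >= 0 and text[pos] == "\\":
--         count += 1
--         pos -= 1
--     return count
--
-- def is_escaped(pos: int, text: str) -> bool:
--     """Check if character at position is escaped by backslashes."""
--     return count_preceding_backslashes(text, pos) % 2 == 1
--
-- def check_delimiter_balance(
--     text: str, open_delim: str = "{", close_delim: str = "}"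
-- ) -> bool:
--     """Check if delimiters are properly balanced in the text, handling escapes."""
--     stack = []
--     i = 0
--     while i < len(text):
--         if text[i] == open_delim and not is_escaped(i, text):
--             stack.append(text[i])
--         elif text[i] == close_delim and not is_escaped(i, text):
--             if not stack:
--                 return False
--             stack.pop()
--         i += 1
--     return len(stack) == 0
-- ===== SOURCE B (Python) =====
-- def check_delimiter_balance(
--     text: str, open_delim: str = "{", close_delim: str = "}"
-- ) -> bool:
--     depth = 0
--     bs = 0  # number of consecutive backslashes immediately before current char
--     for ch in text:
--         escaped = bs % 2 == 1
--         if ch == open_delim and not escaped: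
--             depth += 1
--         elif ch == close_delim and not escaped:
--             if depth == 0:
--                 return False
--             depth -= 1
--         bs = bs + 1 if ch == "\\" else 0
--     return depth == 0
-- ===== Notes on version B (the rewrite author's own statement) =====
-- stated objective: simpler
-- what changed: Replaced the stack and the quadratic backward count_preceding_backslashes scan at every character with a single forward pass maintaining a depth counter and a running count of consecutive preceding backslashes.
import Mathlib
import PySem

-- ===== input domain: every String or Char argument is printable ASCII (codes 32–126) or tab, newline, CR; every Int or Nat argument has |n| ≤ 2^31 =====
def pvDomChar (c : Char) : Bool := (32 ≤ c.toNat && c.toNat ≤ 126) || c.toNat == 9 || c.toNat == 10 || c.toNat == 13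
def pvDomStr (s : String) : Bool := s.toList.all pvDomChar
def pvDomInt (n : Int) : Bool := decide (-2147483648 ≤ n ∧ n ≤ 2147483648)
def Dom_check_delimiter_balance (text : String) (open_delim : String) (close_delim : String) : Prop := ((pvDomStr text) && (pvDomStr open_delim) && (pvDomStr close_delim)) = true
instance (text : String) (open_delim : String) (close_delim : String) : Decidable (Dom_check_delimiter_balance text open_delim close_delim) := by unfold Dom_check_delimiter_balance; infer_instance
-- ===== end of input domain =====

-- B replaces the stack and the backward escape scan by a single forward pass
-- maintaining a depth counter and a running count of preceding backslashes (objective: simpler).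


-- ===== PORT A =====
-- count_preceding_backslashes(text, pos): scans backwards from pos-1 while backslashes
def count_preceding_backslashes (cs : List Char) : Nat → Nat
  | 0 => 0
  | p + 1 => if cs[p]? = some '\\' then count_preceding_backslashes cs p + 1 else 0

def is_escaped (pos : Nat) (cs : List Char) : Bool :=
  count_preceding_backslashes cs pos % 2 == 1

-- the while loop over i, carrying the stack; rest = text[i:]
def checkLoopA (full oc cc : List Char) : List Char → Nat → List Char → Bool
  | [], _, stack => stack.length == 0
  | c :: rest, i, stack =>
    if [c] = oc ∧ ¬ is_escaped i full then
      checkLoopA full oc cc rest (i + 1) (stack ++ [c])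
    else if [c] = cc ∧ ¬ is_escaped i full then
      if stack.isEmpty then false
      else checkLoopA full oc cc rest (i + 1) stack.dropLast
    else
      checkLoopA full oc cc rest (i + 1) stack

def check_delimiter_balance (text : String) (open_delim : String) (close_delim : String) : Bool :=
  checkLoopA text.toList open_delim.toList close_delim.toList text.toList 0 []

-- ===== PORT B =====
-- one forward pass: bs = consecutive backslashes just before the current char, depth counter
def checkLoopB (oc cc : List Char) : List Char → Nat → Nat → Bool
  | [], _, depth => depth == 0
  | c :: rest, bs, depth =>
    let escaped := bs % 2 == 1
    let bs' := if c = '\\' then bs + 1 else 0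
    if [c] = oc ∧ ¬ escaped then
      checkLoopB oc cc rest bs' (depth + 1)
    else if [c] = cc ∧ ¬ escaped then
      if depth = 0 then false
      else checkLoopB oc cc rest bs' (depth - 1)
    else
      checkLoopB oc cc rest bs' depth

def check_delimiter_balance_alt (text : String) (open_delim : String) (close_delim : String) : Bool :=
  checkLoopB open_delim.toList close_delim.toList text.toList 0 0

-- ===== PRECONDITION & SPEC =====
def Spec_check_delimiter_balance (text : String) (open_delim : String) (close_delim : String) (out : Bool) : Prop := out = check_delimiter_balance_alt text open_delim close_delim
instance (text : String) (open_delim : String) (close_delim : String) (out : Bool) : Decidable (Spec_check_delimiter_balance text open_delim close_delim out) := by unfold Spec_check_delimiter_balance; infer_instance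

-- ===== CLAIM (what is proved, stated in full; the proofs are below) =====
def Claim_equal_check_delimiter_balance : Prop := ∀ (text : String) (open_delim : String) (close_delim : String), Dom_check_delimiter_balance text open_delim close_delim → Spec_check_delimiter_balance text open_delim close_delim (check_delimiter_balance text open_delim close_delim)

-- ===== LEMMAS AND PROOFS =====

-- count_preceding_backslashes only reads positions < pos
theorem countPre_append (l1 l2 : List Char) (p : Nat) (h : p ≤ l1.length) :
    count_preceding_backslashes (l1 ++ l2) p = count_preceding_backslashes l1 p := by
  induction p with
  | zero => rfl
  | succ p ih =>
    have hp : p < l1.length := Nat.lt_of_succ_le h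
    have hget : (l1 ++ l2)[p]? = l1[p]? := List.getElem?_append_left hp
    simp only [count_preceding_backslashes, hget, ih (Nat.le_of_lt hp)]

theorem countPre_snoc (pre : List Char) (c : Char) :
    count_preceding_backslashes (pre ++ [c]) (pre.length + 1)
      = if c = '\\' then count_preceding_backslashes pre pre.length + 1 else 0 := by
  have hget : (pre ++ [c])[pre.length]? = some c := by simp
  simp only [count_preceding_backslashes, hget,
    countPre_append pre [c] pre.length (le_refl _)]
  by_cases hc : c = '\\' <;> simp [hc]

theorem loop_agree (oc cc : List Char) :
    ∀ (rest pre stack : List Char),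
      checkLoopA (pre ++ rest) oc cc rest pre.length stack
        = checkLoopB oc cc rest (count_preceding_backslashes pre pre.length) stack.length := by
  intro rest
  induction rest with
  | nil => intro pre stack; rfl
  | cons c rest ih =>
    intro pre stack
    have hesc : is_escaped pre.length (pre ++ c :: rest)
        = (count_preceding_backslashes pre pre.length % 2 == 1) := by
      have hsplit : pre ++ c :: rest = (pre ++ [c]) ++ rest := by simp
      rw [is_escaped, hsplit,
        countPre_append (pre ++ [c]) rest pre.length (by simp),
        countPre_append pre [c] pre.length (le_refl _)]
    have hstep := ih (pre ++ [c])
    have hre : (pre ++ [c]) ++ rest = pre ++ c :: rest := by simp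
    have hlen : (pre ++ [c]).length = pre.length + 1 := by simp
    simp only [hre, hlen, countPre_snoc] at hstep
    simp only [checkLoopA, checkLoopB, hesc]
    by_cases h1 : [c] = oc ∧ ¬ (count_preceding_backslashes pre pre.length % 2 == 1) = true
    · rw [if_pos h1, if_pos h1, hstep (stack ++ [c])]
      simp
    · rw [if_neg h1, if_neg h1]
      by_cases h2 : [c] = cc ∧ ¬ (count_preceding_backslashes pre pre.length % 2 == 1) = true
      · rw [if_pos h2, if_pos h2]
        by_cases hs : stack.isEmpty
        · have h0 : stack.length = 0 := by
            simpa [List.isEmpty_iff_length_eq_zero] using hs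
          rw [if_pos hs, if_pos h0]
        · have h0 : stack.length ≠ 0 := by
            simpa [List.isEmpty_iff_length_eq_zero] using hs
          rw [if_neg hs, if_neg h0, hstep stack.dropLast, List.length_dropLast]
      · rw [if_neg h2, if_neg h2]
        exact hstep stack

-- ===== VERDICT (by name: the statement is the Claim_ definition above) =====
theorem check_delimiter_balance_spec : Claim_equal_check_delimiter_balance := by
  intro text open_delim close_delim _
  unfold Spec_check_delimiter_balance check_delimiter_balance check_delimiter_balance_alt
  have h := loop_agree open_delim.toList close_delim.toList text.toList [] []
  simpa using h
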